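-- pv_equiv track=rewrite | github.com/Ruales1138/Analisis-Y-Diseno-De-Algoritmos | dividir_y_vencer/pares_impares_lista_v2.py | count
-- ===== SOURCE A (Python) =====
-- def count(list, start=None, end=None):
--     if start is None:
--         start = 0
--         end = len(list)-1
--     if start == end:
--         num = list[start]
--         if num % 2 == 0:
--             return (num, 1, 0)
--         else:
--             return (num, 0, 1)
--     mid = (start + end) // 2
--     left = count(list, start, mid)
--     right = count(list, mid+1, end)
--     sum = left[0] + right[0]
--     even = left[1] + right[1]
--     odd = left[2] + right[2]
--     return (sum, even, odd)
-- ===== SOURCE B (Python) =====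
-- def count(list, start=None, end=None):
--     if start is None:
--         start = 0
--         end = len(list)-1
--     total = 0
--     even = 0
--     odd = 0
--     for i in range(start, end+1):
--         num = list[i]
--         total += num
--         if num % 2 == 0:
--             even += 1
--         else:
--             odd += 1
--     return (total, even, odd)
-- ===== Notes on version B (the rewrite author's own statement) =====
-- stated objective: simpler
-- what changed: Replaced the divide-and-conquer recursion (split at the midpoint, recurse on both halves, combine the triples) by a single accumulating loop over range(start, end+1).
import Mathlib
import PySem

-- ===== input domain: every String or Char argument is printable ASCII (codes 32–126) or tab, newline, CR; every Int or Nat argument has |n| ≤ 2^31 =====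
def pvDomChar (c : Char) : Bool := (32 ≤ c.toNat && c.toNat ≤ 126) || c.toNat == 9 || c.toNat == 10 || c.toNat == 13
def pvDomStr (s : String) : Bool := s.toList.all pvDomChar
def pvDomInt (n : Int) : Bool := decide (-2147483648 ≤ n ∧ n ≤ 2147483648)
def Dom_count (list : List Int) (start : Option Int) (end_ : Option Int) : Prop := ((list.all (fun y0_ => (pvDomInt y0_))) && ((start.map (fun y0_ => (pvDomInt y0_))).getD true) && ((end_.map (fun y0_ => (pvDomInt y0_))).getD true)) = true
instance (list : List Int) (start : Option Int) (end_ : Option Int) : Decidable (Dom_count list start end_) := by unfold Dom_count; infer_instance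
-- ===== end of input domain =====

-- B replaces A's divide-and-conquer recursion by a single accumulating loop (simpler).


-- ===== PORT A =====
-- A's divide-and-conquer, with a fuel argument that only makes the (terminating,
-- inside Pre_) recursion total; list[i] ported as pyGetD (IndexError excluded by Pre_).
def countGoA (l : List Int) (fuel : Nat) (a b : Int) : Int × Int × Int :=
  match fuel with
  | 0 => (0, 0, 0)
  | f + 1 =>
    if a = b then
      if PySem.Int.mod (PySem.List.pyGetD l a 0) 2 = 0 then (PySem.List.pyGetD l a 0, 1, 0)
      else (PySem.List.pyGetD l a 0, 0, 1)
    else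
      ((countGoA l f a (PySem.Int.floordiv (a + b) 2)).1 +
         (countGoA l f (PySem.Int.floordiv (a + b) 2 + 1) b).1,
       (countGoA l f a (PySem.Int.floordiv (a + b) 2)).2.1 +
         (countGoA l f (PySem.Int.floordiv (a + b) 2 + 1) b).2.1,
       (countGoA l f a (PySem.Int.floordiv (a + b) 2)).2.2 +
         (countGoA l f (PySem.Int.floordiv (a + b) 2 + 1) b).2.2)

def count (list : List Int) (start : Option Int) (end_ : Option Int) : Int × Int × Int :=
  match start, end_ with
  | none, _ => countGoA list (list.length + 1) 0 ((list.length : Int) - 1)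
  | some a, some b => countGoA list ((b - a).toNat + 1) a b
  | some _, none => (0, 0, 0)   -- Python: TypeError (end is None); excluded by Pre_

-- ===== PORT B =====
def countStep (l : List Int) (s : Int × Int × Int) (i : Int) : Int × Int × Int :=
  if PySem.Int.mod (PySem.List.pyGetD l i 0) 2 = 0 then (s.1 + PySem.List.pyGetD l i 0, s.2.1 + 1, s.2.2)
  else (s.1 + PySem.List.pyGetD l i 0, s.2.1, s.2.2 + 1)

def count_alt (list : List Int) (start : Option Int) (end_ : Option Int) : Int × Int × Int :=
  match start, end_ with
  | none, _ =>
      (PySem.List.pyRange 0 (((list.length : Int) - 1) + 1) 1).foldl (countStep list) (0, 0, 0)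
  | some a, some b =>
      (PySem.List.pyRange a (b + 1) 1).foldl (countStep list) (0, 0, 0)
  | some _, none => (0, 0, 0)   -- Python: TypeError (end is None); excluded by Pre_

-- ===== PRECONDITION & SPEC =====
-- Pre_ excludes exactly the inputs where the Python A raises and returns nothing: start
-- given without end (TypeError), start > end or the defaulted empty-list call
-- (RecursionError from the unbounded recursion), and any index of start..end outside
-- Python's valid range (IndexError); A returns a value on every input satisfying Pre_.
def Pre_count (list : List Int) (start : Option Int) (end_ : Option Int) : Prop :=
  (start = none ∧ list ≠ []) ∨
  (start ≠ none ∧ end_ ≠ none ∧ start.getD 0 ≤ end_.getD 0 ∧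
    -(list.length : Int) ≤ start.getD 0 ∧ end_.getD 0 < (list.length : Int))
instance (list : List Int) (start : Option Int) (end_ : Option Int) : Decidable (Pre_count list start end_) := by unfold Pre_count; infer_instance

def pvWitness_count : List Int × Option Int × Option Int := ([2, 3, 5], none, none)

def Spec_count (list : List Int) (start : Option Int) (end_ : Option Int) (out : Int × Int × Int) : Prop := out = count_alt list start end_
instance (list : List Int) (start : Option Int) (end_ : Option Int) (out : Int × Int × Int) : Decidable (Spec_count list start end_ out) := by unfold Spec_count; infer_instance

-- ===== CLAIM (what is proved, stated in full; the proofs are below) =====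
def Claim_equal_count : Prop := ∀ (list : List Int) (start : Option Int) (end_ : Option Int), Dom_count list start end_ → Pre_count list start end_ → Spec_count list start end_ (count list start end_)

-- ===== LEMMAS AND PROOFS =====

-- the fold state is additive: folding from a shifted state shifts the result
lemma countStep_foldl_shift (l : List Int) (xs : List Int) :
    ∀ (s t : Int × Int × Int),
      xs.foldl (countStep l) (s.1 + t.1, s.2.1 + t.2.1, s.2.2 + t.2.2) =
        (s.1 + (xs.foldl (countStep l) t).1,
         s.2.1 + (xs.foldl (countStep l) t).2.1,
         s.2.2 + (xs.foldl (countStep l) t).2.2) := by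
  induction xs with
  | nil => intro s t; simp
  | cons x xs ih =>
    intro s t
    simp only [List.foldl_cons]
    have hstep : countStep l (s.1 + t.1, s.2.1 + t.2.1, s.2.2 + t.2.2) x =
        (s.1 + (countStep l t x).1, s.2.1 + (countStep l t x).2.1, s.2.2 + (countStep l t x).2.2) := by
      unfold countStep
      split_ifs with h <;> simp [Prod.ext_iff] <;> omega
    rw [hstep]
    exact ih s (countStep l t x)

-- main invariant: with enough fuel and a ≤ b, A's recursion equals B's loop on a..b
lemma goA_eq_fold (l : List Int) :
    ∀ (f : Nat) (a b : Int), a ≤ b → (b - a).toNat < f →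
      countGoA l f a b = (PySem.List.pyRange a (b + 1) 1).foldl (countStep l) (0, 0, 0) := by
  intro f
  induction f with
  | zero => intro a b _ h; omega
  | succ f ih =>
    intro a b hab hf
    by_cases heq : a = b
    · subst heq
      rw [PySem.List.pyRange_one_singleton, List.foldl_cons, List.foldl_nil]
      unfold countGoA countStep
      rw [if_pos rfl]
      split_ifs with h <;> simp
    · have hlt : a < b := lt_of_le_of_ne hab heq
      have hmid := PySem.Int.floordiv_two_mid_bounds (lo := a) (hi := b) hab
      have hmidlt : PySem.Int.floordiv (a + b) 2 < b := by
        rw [PySem.Int.floordiv_lt_iff_lt_mul (by omega)]; omega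
      set mid := PySem.Int.floordiv (a + b) 2 with hmiddef
      have h1 : countGoA l f a mid =
          (PySem.List.pyRange a (mid + 1) 1).foldl (countStep l) (0, 0, 0) :=
        ih a mid hmid.1 (by omega)
      have h2 : countGoA l f (mid + 1) b =
          (PySem.List.pyRange (mid + 1) (b + 1) 1).foldl (countStep l) (0, 0, 0) :=
        ih (mid + 1) b (by omega) (by omega)
      have hsplit : PySem.List.pyRange a (b + 1) 1 =
          PySem.List.pyRange a (mid + 1) 1 ++ PySem.List.pyRange (mid + 1) (b + 1) 1 :=
        PySem.List.pyRange_one_append a (mid + 1) (b + 1) (by omega) (by omega)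
      rw [hsplit, List.foldl_append]
      conv_lhs => rw [countGoA]
      rw [if_neg heq]
      simp only [← hmiddef, h1, h2]
      set L := (PySem.List.pyRange a (mid + 1) 1).foldl (countStep l) (0, 0, 0) with hL
      have hshift := countStep_foldl_shift l (PySem.List.pyRange (mid + 1) (b + 1) 1)
        L (0, 0, 0)
      simp only [add_zero] at hshift
      rw [hshift]

-- ===== VERDICT (by name: the statement is the Claim_ definition above) =====
theorem count_spec : Claim_equal_count := by
  intro list start end_ _ hpre
  unfold Spec_count
  rcases start with _ | a
  · -- defaulted bounds: start = 0, end = len - 1, and list ≠ []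
    have hne : list ≠ [] := by
      rcases hpre with ⟨_, h⟩ | ⟨h, _⟩
      · exact h
      · exact absurd rfl h
    have hlen : 1 ≤ (list.length : Int) := by
      have : list.length ≠ 0 := fun h => hne (List.length_eq_zero_iff.mp h)
      omega
    show count list none end_ = count_alt list none end_
    unfold count count_alt
    exact goA_eq_fold list (list.length + 1) 0 ((list.length : Int) - 1)
      (by omega) (by omega)
  · rcases end_ with _ | b
    · rcases hpre with ⟨h, _⟩ | ⟨_, h, _⟩ <;> simp at h
    · rcases hpre with ⟨h, _⟩ | ⟨_, _, hab, _, _⟩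
      · simp at h
      · simp only [Option.getD_some] at hab
        show count list (some a) (some b) = count_alt list (some a) (some b)
        unfold count count_alt
        exact goA_eq_fold list ((b - a).toNat + 1) a b hab (by omega)
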